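-- pv_equiv track=rewrite | github.com/Zubnuk/Test | schedule_graph.py | __generate_random_vertex_list
-- ===== SOURCE A (Python) =====
-- def __generate_random_vertex_list(vertex_count: int) -> list[str]:
--     vertex_list = list()
--     letter_code = 65
--     num = 0
--     for i in range(vertex_count):
--         if letter_code > 90:
--             letter_code = 65
--         vertex_list.append(chr(letter_code) + str(num))
--         num += 1
--         letter_code += 1
--     return vertex_list
-- ===== SOURCE B (Python) =====
-- def __generate_random_vertex_list(vertex_count: int) -> list[str]:
--     alphabet = [chr(c) for c in range(65, 91)]
--     labels = []
--     base = 0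
--     while base < vertex_count:
--         labels.extend(letter + str(num)
--                       for letter, num in zip(alphabet, range(base, vertex_count)))
--         base += 26
--     return labels
-- ===== Notes on version B (the rewrite author's own statement) =====
-- stated objective: alternative
-- what changed: Replaces A's per-element loop with a wrapping letter_code counter by a block-structured algorithm: a precomputed 26-letter alphabet table is zipped against each 26-aligned slice of the index range, emitting labels one alphabet block at a time.
import Mathlib
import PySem

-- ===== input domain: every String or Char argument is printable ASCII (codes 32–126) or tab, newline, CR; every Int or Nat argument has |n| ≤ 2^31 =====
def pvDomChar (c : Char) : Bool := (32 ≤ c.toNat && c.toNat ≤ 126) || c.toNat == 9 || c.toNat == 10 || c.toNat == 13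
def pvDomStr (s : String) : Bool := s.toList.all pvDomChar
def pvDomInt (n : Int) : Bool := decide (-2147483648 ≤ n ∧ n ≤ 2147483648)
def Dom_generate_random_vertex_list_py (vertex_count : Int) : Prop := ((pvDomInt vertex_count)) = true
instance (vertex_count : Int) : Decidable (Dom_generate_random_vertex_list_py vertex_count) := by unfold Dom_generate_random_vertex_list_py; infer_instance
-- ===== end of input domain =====

-- B replaces A's per-element loop with a wrapping letter_code counter by a block algorithm:
-- a precomputed 26-letter table zipped against each 26-aligned slice of the index range (alternative; same O(n) cost).

-- ===== PORT A =====
-- state: (vertex_list, letter_code, num); chr(c)+str(num) is String.mk (Char.ofNat … :: toChars num) (exact: codes stay in 65..91)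
def generate_random_vertex_list_py (vertex_count : Int) : List String :=
  (((PySem.List.pyRange 0 vertex_count 1).foldl
      (fun (st : List String × Int × Int) _ =>
        let lc := if st.2.1 > 90 then (65 : Int) else st.2.1
        (st.1 ++ [String.mk (Char.ofNat lc.toNat :: PySem.Int.toChars st.2.2)], lc + 1, st.2.2 + 1))
      ([], 65, 0)) : List String × Int × Int).1

-- ===== PORT B =====
-- alphabet = [chr(c) for c in range(65, 91)]
def pvAlphabet : List Char := (PySem.List.pyRange 65 91 1).map (fun c => Char.ofNat c.toNat)

-- the while loop: one recursive call per 26-block; each block zips the alphabet with range(base, vertex_count)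
def pvChunks (base vertex_count : Int) : List String :=
  if _h : base < vertex_count then
    ((pvAlphabet.zip (PySem.List.pyRange base vertex_count 1)).map
      (fun p => String.mk (p.1 :: PySem.Int.toChars p.2))) ++ pvChunks (base + 26) vertex_count
  else []
termination_by (vertex_count - base).toNat
decreasing_by omega

def generate_random_vertex_list_py_alt (vertex_count : Int) : List String :=
  pvChunks 0 vertex_count

-- ===== PRECONDITION & SPEC =====
def Spec_generate_random_vertex_list_py (vertex_count : Int) (out : List String) : Prop := out = generate_random_vertex_list_py_alt vertex_count
instance (vertex_count : Int) (out : List String) : Decidable (Spec_generate_random_vertex_list_py vertex_count out) := by unfold Spec_generate_random_vertex_list_py; infer_instance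

-- ===== CLAIM (what is proved, stated in full; the proofs are below) =====
def Claim_equal_generate_random_vertex_list_py : Prop := ∀ (vertex_count : Int), Dom_generate_random_vertex_list_py vertex_count → Spec_generate_random_vertex_list_py vertex_count (generate_random_vertex_list_py vertex_count)

-- ===== LEMMAS AND PROOFS =====

def pvStepA (st : List String × Int × Int) (_ : Int) : List String × Int × Int :=
  let lc := if st.2.1 > 90 then (65 : Int) else st.2.1
  (st.1 ++ [String.mk (Char.ofNat lc.toNat :: PySem.Int.toChars st.2.2)], lc + 1, st.2.2 + 1)

-- the label both programs produce at index i (for 0 ≤ i)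
def pvElem (i : Int) : String :=
  String.mk (Char.ofNat (65 + PySem.Int.mod i 26).toNat :: PySem.Int.toChars i)

-- letter_code held after n iterations of A's loop
def pvLc (n : Nat) : Int := if n = 0 then 65 else 66 + ((n - 1) % 26 : Nat)

lemma pvLoopA (n : Nat) :
    ((List.range n).map (Nat.cast : Nat → Int)).foldl pvStepA ([], 65, 0)
      = ((List.range n).map (fun k => pvElem ((k : Nat) : Int)), pvLc n, (n : Int)) := by
  induction n with
  | zero => simp [pvLc]
  | succ n ih =>
    rw [List.range_succ, List.map_append, List.foldl_append, ih]
    simp only [List.map_cons, List.map_nil, List.foldl_cons, List.foldl_nil, pvStepA]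
    have h : (if pvLc n > 90 then (65 : Int) else pvLc n) = 65 + PySem.Int.mod (n : Int) 26 := by
      rw [PySem.Int.mod_eq_emod_of_pos (by norm_num : (0:Int) < 26)]
      simp only [pvLc]
      split_ifs <;> omega
    refine Prod.ext ?_ (Prod.ext ?_ ?_)
    · simp only [List.map_append, List.map_cons, List.map_nil]
      rw [h]
      rfl
    · simp only [pvLc, Nat.add_sub_cancel, Nat.add_one_ne_zero, if_false]
      split_ifs <;> omega
    · push_cast; ring

-- B's while loop produces the same per-index labels, block by block
lemma pvChunksEq (base vc : Int) (hb : 0 ≤ base) (hm : base % 26 = 0) :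
    pvChunks base vc = (List.range (vc - base).toNat).map (fun k : Nat => pvElem (base + (k : Int))) := by
  rw [pvChunks]
  split_ifs with h
  · have hlen : (pvAlphabet.zip (PySem.List.pyRange base vc 1)).length
        = min 26 (vc - base).toNat := by
      simp [List.length_zip, pvAlphabet, PySem.List.length_pyRange_one]
    set m : Nat := (vc - base).toNat with hmdef
    have hmpos : 0 < m := by omega
    set t : Nat := min 26 m with htdef
    have hsplit : m = t + (m - t) := by omega
    rw [pvChunksEq (base + 26) vc (by omega) (by omega)]
    have hrest : (vc - (base + 26)).toNat = m - t := by omega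
    rw [hrest, hsplit, List.range_add, List.map_append]
    congr 1
    · -- the zipped block equals the first t labels
      apply List.ext_getElem
      · simp [hlen, List.length_map]
      · intro j hj _
        have hjt : j < t := by simpa [hlen] using hj
        have hj26 : j < 26 := by omega
        have hjm : j < m := by omega
        simp only [List.getElem_map, List.getElem_zip, pvAlphabet, pvElem]
        rw [PySem.List.getElem_pyRange_one]
        rw [PySem.List.getElem_pyRange_one]
        have hmod : PySem.Int.mod (base + (j : Int)) 26 = (j : Int) := by
          rw [PySem.Int.mod_eq_emod_of_pos (by norm_num : (0:Int) < 26)]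
          omega
        simp only [List.getElem_range]
        rw [hmod]
    · -- the recursive call covers indices t, t+1, …
      have hmt : t + (m - t) - t = m - t := by omega
      rw [hmt, List.map_map]
      apply List.map_congr_left
      intro k hk
      have : t = 26 := by
        have := List.mem_range.mp hk; omega
      simp only [Function.comp]
      congr 1
      push_cast
      omega
  · have : (vc - base).toNat = 0 := by omega
    simp [this]
termination_by (vc - base).toNat
decreasing_by omega

-- ===== VERDICT (by name: the statement is the Claim_ definition above) =====
theorem generate_random_vertex_list_py_spec : Claim_equal_generate_random_vertex_list_py := by
  intro vc _
  unfold Spec_generate_random_vertex_list_py generate_random_vertex_list_py generate_random_vertex_list_py_alt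
  rw [PySem.List.pyRange_one]
  simp only [sub_zero, zero_add]
  have hfun : (fun (st : List String × Int × Int) (_ : Int) =>
      let lc := if st.2.1 > 90 then (65 : Int) else st.2.1
      (st.1 ++ [String.mk (Char.ofNat lc.toNat :: PySem.Int.toChars st.2.2)], lc + 1, st.2.2 + 1)) = pvStepA := by
    funext st x; rfl
  rw [hfun, pvLoopA vc.toNat, pvChunksEq 0 vc le_rfl (by norm_num)]
  simp
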